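-- pv_equiv track=rewrite | github.com/ShimShining/wheat | race/prac/algo/eat_burgers.py | max_eat_burgers_cache
-- ===== SOURCE A (Python) =====
-- def max_eat_burgers_cache(burger1, burger2, total_time, cache):
--     if total_time == 0:
--         return 0
--     if total_time < 0:
--         return -1
--     if cache[total_time] != -2:
--         return cache[total_time]
--     burger1_cnt = max_eat_burgers_cache(burger1, burger2, total_time-burger1, cache)
--     burger2_cnt = max_eat_burgers_cache(burger1, burger2, total_time- burger2, cache)
--     if burger1_cnt == -1 and burger2_cnt == -1:
--         cache[total_time] = -1
--         return -1
--     cache[total_time] = max(burger2_cnt, burger1_cnt) + 1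
--     return cache[total_time]
-- ===== SOURCE B (Python) =====
-- def max_eat_burgers_cache(burger1, burger2, total_time, cache):
--     # Bottom-up DP over 1..total_time instead of top-down memoized recursion.
--     # Return value only: unlike A, this does not write memo entries into `cache`.
--     if total_time <= 0:
--         return 0 if total_time == 0 else -1
--     dp = [0] * (total_time + 1)
--     for t in range(1, total_time + 1):
--         if cache[t] != -2:
--             dp[t] = cache[t]
--         else:
--             c1 = -1 if t - burger1 < 0 else dp[t - burger1]
--             c2 = -1 if t - burger2 < 0 else dp[t - burger2]
--             dp[t] = -1 if (c1 == -1 and c2 == -1) else max(c2, c1) + 1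
--     return dp[total_time]
-- ===== Notes on version B (the rewrite author's own statement) =====
-- stated objective: alternative
-- what changed: Top-down memoized recursion that mutates the caller's cache is replaced by a bottom-up DP loop filling a fresh dp table over 1..total_time (cache is only read, never written).
-- outside the precondition, e.g. on max_eat_burgers_cache(-2, 1, 2, [-2, -2, 7]): A returns 7, B raises IndexError
import Mathlib
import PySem

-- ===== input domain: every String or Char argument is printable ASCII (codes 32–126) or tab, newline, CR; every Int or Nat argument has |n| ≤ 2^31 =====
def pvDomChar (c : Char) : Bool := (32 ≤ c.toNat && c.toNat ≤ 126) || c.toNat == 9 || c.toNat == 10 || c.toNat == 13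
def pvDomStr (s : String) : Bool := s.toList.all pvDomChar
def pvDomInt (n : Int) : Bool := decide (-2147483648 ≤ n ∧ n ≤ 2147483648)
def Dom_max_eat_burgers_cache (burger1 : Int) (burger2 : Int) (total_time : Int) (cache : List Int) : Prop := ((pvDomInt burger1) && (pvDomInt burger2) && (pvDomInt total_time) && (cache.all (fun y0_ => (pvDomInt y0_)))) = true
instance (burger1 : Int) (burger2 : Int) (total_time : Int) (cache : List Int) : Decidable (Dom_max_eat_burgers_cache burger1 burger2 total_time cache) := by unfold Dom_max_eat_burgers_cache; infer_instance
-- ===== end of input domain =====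

-- B replaces A's top-down memoized recursion (which mutates `cache`) by a bottom-up DP
-- over a fresh dp table; the equivalence proved is about the RETURN value only — A writes
-- memo entries into `cache`, B never writes to it.

-- ===== PORT A =====
-- A's recursion, fuel-indexed (each recursive call strictly decreases total_time under
-- Pre_, so fuel total_time.toNat + 1 suffices); the pair carries the mutated cache.
-- `none` from pyGet? is Python's IndexError, excluded by Pre_.
def goA (b1 b2 : Int) : Nat → Int → List Int → Int × List Int
  | 0, _, c => (0, c)
  | fuel+1, t, c =>
    if t = 0 then (0, c)
    else if t < 0 then (-1, c)
    else
      match PySem.List.pyGet? c t with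
      | none => (0, c)
      | some v =>
        if v ≠ -2 then (v, c)
        else
          let p1 := goA b1 b2 fuel (t - b1) c
          let p2 := goA b1 b2 fuel (t - b2) p1.2
          if p1.1 = -1 ∧ p2.1 = -1 then (-1, p2.2.set t.toNat (-1))
          else (max p2.1 p1.1 + 1, p2.2.set t.toNat (max p2.1 p1.1 + 1))

def max_eat_burgers_cache (burger1 : Int) (burger2 : Int) (total_time : Int) (cache : List Int) : Int :=
  (goA burger1 burger2 (total_time.toNat + 1) total_time cache).1

-- ===== PORT B =====
-- dp[x] lookup guarded by x < 0 (B's `-1 if x < 0 else dp[x]`)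
def lookB (dp : List Int) (x : Int) : Int :=
  if x < 0 then -1 else (PySem.List.pyGet? dp x).getD 0

-- one iteration of B's `for t in range(1, total_time+1)` loop body
def stepB (b1 b2 : Int) (cache : List Int) (dp : List Int) (t : Int) : List Int :=
  match PySem.List.pyGet? cache t with
  | none => dp
  | some v =>
    if v ≠ -2 then dp.set t.toNat v
    else
      let c1 := lookB dp (t - b1)
      let c2 := lookB dp (t - b2)
      dp.set t.toNat (if c1 = -1 ∧ c2 = -1 then -1 else max c2 c1 + 1)

def max_eat_burgers_cache_alt (burger1 : Int) (burger2 : Int) (total_time : Int) (cache : List Int) : Int :=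
  if total_time ≤ 0 then (if total_time = 0 then 0 else -1)
  else
    let dp := (PySem.List.pyRange 1 (total_time + 1) 1).foldl (stepB burger1 burger2 cache)
                (List.replicate (total_time.toNat + 1) 0)
    (PySem.List.pyGet? dp total_time).getD 0

-- ===== PRECONDITION & SPEC =====
-- Pre_ excludes (a) total_time > 0 with total_time ≥ len(cache), where A raises IndexError,
-- and (b) total_time > 0 with a non-positive burger time, where A recurses forever on any
-- cache miss and returns only when memoised entries happen to cut every such path; B's dp
-- table does not cover those out-of-range offsets (see claim cites).
def Pre_max_eat_burgers_cache (burger1 : Int) (burger2 : Int) (total_time : Int) (cache : List Int) : Prop :=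
  total_time ≤ 0 ∨ (total_time < (cache.length : Int) ∧ 1 ≤ burger1 ∧ 1 ≤ burger2)
instance (burger1 : Int) (burger2 : Int) (total_time : Int) (cache : List Int) : Decidable (Pre_max_eat_burgers_cache burger1 burger2 total_time cache) := by unfold Pre_max_eat_burgers_cache; infer_instance

def pvWitness_max_eat_burgers_cache : Int × Int × Int × List Int := (2, 3, 5, [-2, -2, -2, -2, -2, -2])

def Spec_max_eat_burgers_cache (burger1 : Int) (burger2 : Int) (total_time : Int) (cache : List Int) (out : Int) : Prop := out = max_eat_burgers_cache_alt burger1 burger2 total_time cache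
instance (burger1 : Int) (burger2 : Int) (total_time : Int) (cache : List Int) (out : Int) : Decidable (Spec_max_eat_burgers_cache burger1 burger2 total_time cache out) := by unfold Spec_max_eat_burgers_cache; infer_instance

-- ===== CLAIM (what is proved, stated in full; the proofs are below) =====
def Claim_equal_max_eat_burgers_cache : Prop := ∀ (burger1 : Int) (burger2 : Int) (total_time : Int) (cache : List Int), Dom_max_eat_burgers_cache burger1 burger2 total_time cache → Pre_max_eat_burgers_cache burger1 burger2 total_time cache → Spec_max_eat_burgers_cache burger1 burger2 total_time cache (max_eat_burgers_cache burger1 burger2 total_time cache)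

-- ===== LEMMAS AND PROOFS =====

-- the pure value both programs compute: memoisation-free recursion on the ORIGINAL cache
def gF (b1 b2 : Int) (c0 : List Int) : Nat → Int → Int
  | 0, _ => 0
  | fuel+1, t =>
    if t = 0 then 0
    else if t < 0 then -1
    else if c0.getD t.toNat 0 ≠ -2 then c0.getD t.toNat 0
    else if gF b1 b2 c0 fuel (t - b1) = -1 ∧ gF b1 b2 c0 fuel (t - b2) = -1 then -1
    else max (gF b1 b2 c0 fuel (t - b2)) (gF b1 b2 c0 fuel (t - b1)) + 1

def G (b1 b2 : Int) (c0 : List Int) (t : Int) : Int := gF b1 b2 c0 (t.toNat + 1) t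

theorem gF_mono (b1 b2 : Int) (c0 : List Int) (hb1 : 1 ≤ b1) (hb2 : 1 ≤ b2) :
    ∀ f1 f2 : Nat, ∀ t : Int, t.toNat < f1 → t.toNat < f2 →
      gF b1 b2 c0 f1 t = gF b1 b2 c0 f2 t := by
  intro f1
  induction f1 with
  | zero => intro f2 t h1 _; omega
  | succ f ih =>
    intro f2 t h1 h2
    cases f2 with
    | zero => omega
    | succ f2' =>
      simp only [gF]
      by_cases h0 : t = 0
      · simp [h0]
      · by_cases hneg : t < 0
        · simp [h0, hneg]
        · rw [ih f2' (t - b1) (by omega) (by omega), ih f2' (t - b2) (by omega) (by omega)]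

-- the cache A carries: original entries, except reachable miss entries overwritten with G
def AgreeC (b1 b2 : Int) (c0 cm : List Int) : Prop :=
  cm.length = c0.length ∧
  ∀ i : Nat, 0 < i → (cm[i]? = c0[i]? ∨ (c0[i]? = some (-2) ∧ cm[i]? = some (G b1 b2 c0 (i : Int))))

theorem G_hit (b1 b2 : Int) (c0 : List Int) (t : Int) (ht : 0 < t) (v : Int)
    (hv : c0[t.toNat]? = some v) (hne : v ≠ -2) : G b1 b2 c0 t = v := by
  have hg : c0.getD t.toNat 0 = v := by simp [List.getD, hv]
  simp only [G, gF]
  rw [if_neg (by omega), if_neg (by omega), hg, if_pos hne]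

theorem G_miss (b1 b2 : Int) (c0 : List Int) (hb1 : 1 ≤ b1) (hb2 : 1 ≤ b2)
    (t : Int) (ht : 0 < t) (hv : c0[t.toNat]? = some (-2)) :
    G b1 b2 c0 t =
      (if G b1 b2 c0 (t - b1) = -1 ∧ G b1 b2 c0 (t - b2) = -1 then -1
       else max (G b1 b2 c0 (t - b2)) (G b1 b2 c0 (t - b1)) + 1) := by
  have hg : c0.getD t.toNat 0 = -2 := by simp [List.getD, hv]
  conv_lhs => simp only [G, gF]
  rw [if_neg (by omega : ¬ t = 0), if_neg (by omega : ¬ t < 0), hg,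
      if_neg (by simp : ¬ (-2 : Int) ≠ -2)]
  rw [gF_mono b1 b2 c0 hb1 hb2 t.toNat ((t - b1).toNat + 1) (t - b1) (by omega) (by omega),
      gF_mono b1 b2 c0 hb1 hb2 t.toNat ((t - b2).toNat + 1) (t - b2) (by omega) (by omega)]
  rfl

theorem G_zero (b1 b2 : Int) (c0 : List Int) : G b1 b2 c0 0 = 0 := by simp [G, gF]

theorem G_neg (b1 b2 : Int) (c0 : List Int) (t : Int) (ht : t < 0) : G b1 b2 c0 t = -1 := by
  have h : t.toNat = 0 := by omega
  simp only [G, h, gF]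
  rw [if_neg (by omega), if_pos ht]

theorem AgreeC_set (b1 b2 : Int) (c0 cm : List Int) (h : AgreeC b1 b2 c0 cm) (t : Int)
    (ht : 0 < t) (hlt : t.toNat < c0.length) (hv : c0[t.toNat]? = some (-2)) :
    AgreeC b1 b2 c0 (cm.set t.toNat (G b1 b2 c0 t)) := by
  unfold AgreeC at h ⊢
  obtain ⟨hlen, hA⟩ := h
  refine ⟨by simp [hlen], ?_⟩
  intro i hi
  by_cases hit : i = t.toNat
  · subst hit
    right
    refine ⟨hv, ?_⟩
    rw [List.getElem?_set_self (by omega)]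
    rw [Int.toNat_of_nonneg (by omega : (0:Int) ≤ t)]
  · rw [List.getElem?_set_ne (by omega)]
    exact hA i hi

theorem goA_eq (b1 b2 : Int) (c0 : List Int) (hb1 : 1 ≤ b1) (hb2 : 1 ≤ b2) :
    ∀ fuel : Nat, ∀ t : Int, ∀ cm : List Int, AgreeC b1 b2 c0 cm →
      t.toNat < c0.length → t.toNat < fuel →
      (goA b1 b2 fuel t cm).1 = G b1 b2 c0 t ∧ AgreeC b1 b2 c0 (goA b1 b2 fuel t cm).2 := by
  intro fuel
  induction fuel with
  | zero => intro t cm _ _ h; omega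
  | succ f ih =>
    intro t cm hAg hlen hfuel
    by_cases h0 : t = 0
    · subst h0; simp [goA, G_zero, hAg]
    · by_cases hneg : t < 0
      · simp [goA, if_neg h0, if_pos hneg, G_neg b1 b2 c0 t hneg, hAg]
      · have hpos : 0 < t := by omega
        have hget : PySem.List.pyGet? cm t = cm[t.toNat]? := PySem.List.pyGet?_of_nonneg _ (by omega)
        obtain ⟨hclen, hA⟩ := hAg
        have hcin : t.toNat < cm.length := by omega
        obtain ⟨v, hv⟩ : ∃ v, cm[t.toNat]? = some v := ⟨cm[t.toNat], List.getElem?_eq_getElem hcin⟩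
        have hdis := hA t.toNat (by omega)
        by_cases hv2 : v = -2
        · -- miss branch of A
          have hv0 : c0[t.toNat]? = some (-2) := by
            rcases hdis with h | h
            · rw [← h, hv, hv2]
            · exact h.1
          have hch1 := ih (t - b1) cm ⟨hclen, hA⟩ (by omega) (by omega)
          have hch2 := ih (t - b2) (goA b1 b2 f (t - b1) cm).2 hch1.2 (by omega) (by omega)
          have hGt := G_miss b1 b2 c0 hb1 hb2 t hpos hv0
          simp only [goA, if_neg h0, if_neg hneg, hget, hv]
          rw [if_neg (by simp [hv2] : ¬ v ≠ -2)]
          simp only [hch1.1, hch2.1]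
          have hset := AgreeC_set b1 b2 c0
            (goA b1 b2 f (t - b2) (goA b1 b2 f (t - b1) cm).2).2 hch2.2 t hpos hlen hv0
          by_cases hboth : G b1 b2 c0 (t - b1) = -1 ∧ G b1 b2 c0 (t - b2) = -1
          · rw [if_pos hboth]
            refine ⟨by rw [hGt, if_pos hboth], ?_⟩
            simpa [hGt, if_pos hboth] using hset
          · rw [if_neg hboth]
            refine ⟨by rw [hGt, if_neg hboth], ?_⟩
            simpa [hGt, if_neg hboth] using hset
        · -- hit branch of A: the read value is G t either way
          have hGv : G b1 b2 c0 t = v := by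
            rcases hdis with h | h
            · exact G_hit b1 b2 c0 t hpos v (by rw [← h, hv]) hv2
            · have h2 : some v = some (G b1 b2 c0 ((t.toNat : Nat) : Int)) := by rw [← hv, h.2]
              rw [Int.toNat_of_nonneg (by omega : (0:Int) ≤ t)] at h2
              exact (Option.some.inj h2).symm
          simp only [goA, if_neg h0, if_neg hneg, hget, hv]
          rw [if_pos hv2]
          exact ⟨hGv.symm, ⟨hclen, hA⟩⟩

-- B's loop invariant: after processing 1..k, dp holds G on 0..k
theorem dp_inv (b1 b2 : Int) (c0 : List Int) (hb1 : 1 ≤ b1) (hb2 : 1 ≤ b2)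
    (N : Nat) (hN : N < c0.length) :
    ∀ k : Nat, k ≤ N →
      ((PySem.List.pyRange 1 ((k : Int) + 1) 1).foldl (stepB b1 b2 c0)
        (List.replicate (N + 1) 0)).length = N + 1 ∧
      ∀ i : Nat, i ≤ k →
        ((PySem.List.pyRange 1 ((k : Int) + 1) 1).foldl (stepB b1 b2 c0)
          (List.replicate (N + 1) 0))[i]? = some (G b1 b2 c0 (i : Int)) := by
  intro k
  induction k with
  | zero =>
    intro _
    rw [PySem.List.pyRange_one_eq_nil (by omega)]
    refine ⟨by simp, ?_⟩
    intro i hi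
    have h0 : i = 0 := by omega
    subst h0
    simp [G_zero]
  | succ k ih =>
    intro hk
    obtain ⟨hlen, hdp⟩ := ih (by omega)
    have hkc : ((k + 1 : Nat) : Int) = (k : Int) + 1 := by push_cast; ring
    rw [hkc, PySem.List.pyRange_one_succ_right (by omega : (1:Int) ≤ (k : Int) + 1),
        List.foldl_append]
    set dp := (PySem.List.pyRange 1 ((k : Int) + 1) 1).foldl (stepB b1 b2 c0)
        (List.replicate (N + 1) 0) with hdpdef
    simp only [List.foldl_cons, List.foldl_nil]
    have htn : ((k : Int) + 1).toNat = k + 1 := by omega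
    have hc0 : PySem.List.pyGet? c0 ((k : Int) + 1) = c0[k + 1]? := by
      rw [PySem.List.pyGet?_of_nonneg _ (by omega), htn]
    have hin : k + 1 < c0.length := by omega
    obtain ⟨v, hv⟩ : ∃ v, c0[k + 1]? = some v := ⟨c0[k + 1], List.getElem?_eq_getElem hin⟩
    by_cases hv2 : v = -2
    · subst hv2
      -- miss: B combines dp[t-b1], dp[t-b2]
      have hlook : ∀ b : Int, 1 ≤ b →
          lookB dp ((k : Int) + 1 - b) = G b1 b2 c0 ((k : Int) + 1 - b) := by
        intro b hb
        by_cases hx : (k : Int) + 1 - b < 0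
        · rw [lookB, if_pos hx, G_neg b1 b2 c0 _ hx]
        · have hxt : ((k : Int) + 1 - b).toNat ≤ k := by omega
          rw [lookB, if_neg hx, PySem.List.pyGet?_of_nonneg _ (by omega),
              hdp ((k : Int) + 1 - b).toNat hxt]
          rw [Option.getD_some, Int.toNat_of_nonneg (by omega : (0:Int) ≤ (k : Int) + 1 - b)]
      have hGt := G_miss b1 b2 c0 hb1 hb2 ((k : Int) + 1) (by omega) (by rw [htn]; exact hv)
      simp only [stepB, hc0, hv]
      rw [if_neg (by simp : ¬ (-2:Int) ≠ -2)]
      simp only [hlook b1 hb1, hlook b2 hb2, htn]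
      refine ⟨by simp [hlen], ?_⟩
      intro i hi
      by_cases hik : i = k + 1
      · subst hik
        rw [List.getElem?_set_self (by rw [hlen]; omega), hkc, ← hGt]
      · rw [List.getElem?_set_ne (by omega)]
        exact hdp i (by omega)
    · -- hit: B copies cache[t]
      have hGt := G_hit b1 b2 c0 ((k : Int) + 1) (by omega) v (by rw [htn]; exact hv) hv2
      simp only [stepB, hc0, hv]
      rw [if_pos hv2, htn]
      refine ⟨by simp [hlen], ?_⟩
      intro i hi
      by_cases hik : i = k + 1
      · subst hik
        rw [List.getElem?_set_self (by rw [hlen]; omega), hkc, hGt]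
      · rw [List.getElem?_set_ne (by omega)]
        exact hdp i (by omega)

-- ===== VERDICT (by name: the statement is the Claim_ definition above) =====
theorem max_eat_burgers_cache_spec : Claim_equal_max_eat_burgers_cache := by
  intro b1 b2 T cache _ hpre
  unfold Spec_max_eat_burgers_cache max_eat_burgers_cache max_eat_burgers_cache_alt
  by_cases hT0 : T = 0
  · subst hT0; simp [goA]
  · by_cases hTn : T < 0
    · have h0 : T.toNat = 0 := by omega
      rw [h0]
      simp [goA, if_pos hTn, if_pos (by omega : T ≤ 0), if_neg hT0]
    · have hTpos : 0 < T := by omega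
      rcases hpre with h | ⟨hlen, hb1, hb2⟩
      · omega
      · have hNlt : T.toNat < cache.length := by omega
        have hA := goA_eq b1 b2 cache hb1 hb2 (T.toNat + 1) T cache
          ⟨rfl, fun i _ => Or.inl rfl⟩ hNlt (by omega)
        obtain ⟨hdplen, hdp⟩ := dp_inv b1 b2 cache hb1 hb2 T.toNat hNlt T.toNat le_rfl
        rw [hA.1, if_neg (by omega : ¬ T ≤ 0)]
        have hcast : ((T.toNat : Int) + 1) = T + 1 := by omega
        rw [← hcast]
        show G b1 b2 cache T =
          (PySem.List.pyGet? ((PySem.List.pyRange 1 ((T.toNat : Int) + 1) 1).foldl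
            (stepB b1 b2 cache) (List.replicate (T.toNat + 1) 0)) T).getD 0
        rw [PySem.List.pyGet?_of_nonneg _ (by omega : (0:Int) ≤ T),
            hdp T.toNat le_rfl, Option.getD_some,
            Int.toNat_of_nonneg (by omega : (0:Int) ≤ T)]
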